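-- pv_equiv track=rewrite | github.com/LWZsama/issie-dgm-parser | issie-dgm-parser.py | build_component_refs
-- ===== SOURCE A (Python) =====
-- from typing import Any, Dict, List, Optional, Tuple
--
-- def build_component_refs(components: List[Dict[str, Any]]) -> Dict[str, str]:
--     label_counts: Dict[str, int] = {}
--     for component in components:
--         base = component.get("label") or component.get("type_case") or "COMP"
--         label_counts[base] = label_counts.get(base, 0) + 1
--
--     seen: Dict[str, int] = {}
--     refs: Dict[str, str] = {}
--     for component in components:
--         base = component.get("label") or component.get("type_case") or "COMP"
--         seen[base] = seen.get(base, 0) + 1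
--         ref = base if label_counts[base] == 1 else f"{base}#{seen[base]}"
--         refs[component["id"]] = ref
--     return refs
-- ===== SOURCE B (Python) =====
-- from typing import Any, Dict, List
--
-- def build_component_refs(components: List[Dict[str, Any]]) -> Dict[str, str]:
--     # Stage 1: group component positions by their base name.
--     groups: Dict[str, List[int]] = {}
--     for i, component in enumerate(components):
--         base = component.get("label") or component.get("type_case") or "COMP"
--         groups.setdefault(base, []).append(i)
--     # Stage 2: assign a ref per position, one group at a time.
--     ref_at = [""] * len(components)
--     for base, idxs in groups.items():
--         if len(idxs) == 1:
--             ref_at[idxs[0]] = base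
--         else:
--             for k, i in enumerate(idxs, 1):
--                 ref_at[i] = f"{base}#{k}"
--     # Stage 3: write refs in original component order (last write wins on duplicate ids).
--     refs: Dict[str, str] = {}
--     for component, ref in zip(components, ref_at):
--         refs[component["id"]] = ref
--     return refs
-- ===== Notes on version B (the rewrite author's own statement) =====
-- stated objective: alternative
-- what changed: Replaced A's single streaming pass with running per-base counters by a group-by decomposition: a dict mapping each base to the list of component positions sharing it, a group-by-group pass assigning base (singleton group) or base#k (k-th position in the group) into a position array, and a final pass writing the refs dict in original component order.
import Mathlib
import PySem

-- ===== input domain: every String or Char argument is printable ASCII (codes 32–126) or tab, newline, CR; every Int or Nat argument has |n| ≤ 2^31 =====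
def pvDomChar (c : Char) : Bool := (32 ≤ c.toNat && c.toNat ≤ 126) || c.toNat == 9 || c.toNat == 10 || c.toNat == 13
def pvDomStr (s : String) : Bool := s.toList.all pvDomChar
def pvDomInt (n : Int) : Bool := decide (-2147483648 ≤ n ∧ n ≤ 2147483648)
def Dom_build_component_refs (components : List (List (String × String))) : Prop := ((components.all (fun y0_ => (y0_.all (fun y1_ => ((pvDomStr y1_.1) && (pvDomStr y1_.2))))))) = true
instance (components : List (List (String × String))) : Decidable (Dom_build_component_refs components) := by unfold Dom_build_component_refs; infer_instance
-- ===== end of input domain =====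

-- B replaces A's streaming counter pass by a group-by decomposition (dict base -> positions,
-- per-group assignment into a position array, final dict written in component order);
-- objective: alternative, same results, no speed claim.


-- ===== PORT A =====
-- `c.get("label") or c.get("type_case") or "COMP"`: both None (missing key) and "" are falsy,
-- so getD with default "" followed by a non-emptiness test is exact.
def pyBase (c : List (String × String)) : String :=
  let l := (PySem.Dict.mk c).getD "label" ""
  if l ≠ "" then l
  else
    let t := (PySem.Dict.mk c).getD "type_case" ""
    if t ≠ "" then t else "COMP"

def build_component_refs (components : List (List (String × String))) : List (String × String)  :=
  let label_counts : PySem.Dict String Int :=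
    components.foldl (fun d c => d.insert (pyBase c) (d.getD (pyBase c) 0 + 1)) PySem.Dict.empty
  let st :=
    components.foldl
      (fun (st : PySem.Dict String Int × PySem.Dict String String) c =>
        let base := pyBase c
        let seen := st.1.insert base (st.1.getD base 0 + 1)
        let ref := if label_counts.getD base 0 == 1 then base
                   else base ++ "#" ++ PySem.Int.toStr (seen.getD base 0)
        -- component["id"]: Pre_ requires the key, so getD never sees its default
        (seen, st.2.insert ((PySem.Dict.mk c).getD "id" "") ref))
      (PySem.Dict.empty, PySem.Dict.empty)
  st.2.items

-- ===== PORT B =====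
def build_component_refs_alt (components : List (List (String × String))) : List (String × String) :=
  -- stage 1: groups[base] = ordered list of positions with that base
  let groups : PySem.Dict String (List Int) :=
    (PySem.List.enumerate components).foldl
      (fun d p => d.modify (pyBase p.2) [] (· ++ [p.1])) PySem.Dict.empty
  -- stage 2: one ref per position, assigned group by group
  let ref_at :=
    groups.items.foldl
      (fun ra g =>
        if g.2.length == 1 then
          PySem.List.pySetD ra (PySem.List.pyGetD g.2 0 0) g.1
        else
          (PySem.List.enumerate g.2 1).foldl
            (fun r p => PySem.List.pySetD r p.2 (g.1 ++ "#" ++ PySem.Int.toStr p.1)) ra)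
      (List.replicate components.length "")
  -- stage 3: write refs in original component order
  let refs :=
    (components.zip ref_at).foldl
      (fun (refs : PySem.Dict String String) p =>
        refs.insert ((PySem.Dict.mk p.1).getD "id" "") p.2)
      PySem.Dict.empty
  refs.items

-- ===== PRECONDITION & SPEC =====
-- Pre_ excludes exactly the inputs where A raises KeyError: a component without an "id" key.
def Pre_build_component_refs (components : List (List (String × String))) : Prop :=
  ∀ c ∈ components, (PySem.Dict.mk c).contains "id" = true
instance (components : List (List (String × String))) : Decidable (Pre_build_component_refs components) := by unfold Pre_build_component_refs; infer_instance

def pvWitness_build_component_refs : (List (List (String × String))) :=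
  [[("id", "n1"), ("label", "G1")], [("id", "n2"), ("type_case", "And")], [("id", "n3"), ("label", "G1")]]

def Spec_build_component_refs (components : List (List (String × String))) (out : List (String × String)) : Prop := out = build_component_refs_alt components
instance (components : List (List (String × String))) (out : List (String × String)) : Decidable (Spec_build_component_refs components out) := by unfold Spec_build_component_refs; infer_instance

-- ===== CLAIM (what is proved, stated in full; the proofs are below) =====
def Claim_equal_build_component_refs : Prop := ∀ (components : List (List (String × String))), Dom_build_component_refs components → Pre_build_component_refs components → Spec_build_component_refs components (build_component_refs components)

-- ===== LEMMAS AND PROOFS =====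

-- the canonical middle form both ports are reduced to: insert (id_i, ref_i) in component
-- order, ref_i computed from the whole-list count and the prefix count of base_i
def canonRefs (components : List (List (String × String))) : PySem.Dict String String :=
  let bases := components.map pyBase
  (PySem.List.enumerate (components.zip bases)).foldl
    (fun (refs : PySem.Dict String String) p =>
      refs.insert ((PySem.Dict.mk p.2.1).getD "id" "")
        (if bases.count p.2.2 == 1 then p.2.2
         else p.2.2 ++ "#" ++ PySem.Int.toStr ((PySem.List.slice bases none (some (p.1 + 1))).count p.2.2 : Nat)))
    PySem.Dict.empty

-- ---------- A side (A = canonRefs) ----------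

-- A's first pass is a counter: its lookup is the count of the base in the whole list.
lemma label_counts_getD (components : List (List (String × String))) (b : String) :
    (components.foldl (fun d c => d.insert (pyBase c) (d.getD (pyBase c) 0 + 1)) PySem.Dict.empty).getD b 0
      = ((components.map pyBase).count b : Int) := by
  suffices h : ∀ (l : List (List (String × String))) (d : PySem.Dict String Int),
      (l.foldl (fun d c => d.insert (pyBase c) (d.getD (pyBase c) 0 + 1)) d).getD b 0
        = d.getD b 0 + ((l.map pyBase).count b : Int) by
    simpa using h components PySem.Dict.empty
  intro l
  induction l with
  | nil => intro d; simp
  | cons c l ih =>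
    intro d
    simp only [List.foldl_cons, ih, List.map_cons]
    by_cases h : b = pyBase c
    · subst h; rw [PySem.Dict.getD_insert_self]; simp; ring
    · rw [PySem.Dict.getD_insert_of_ne d (d.getD (pyBase c) 0 + 1) 0 h]
      simp [Ne.symm h]

-- A's second pass agrees step by step with canonRefs' fold, given that `seen` holds the
-- prefix counts and `lc` (A's label_counts) holds the total counts.
lemma loop_eq (bases : List String) (lc : PySem.Dict String Int)
    (hlc : ∀ b, lc.getD b 0 = (bases.count b : Int)) :
    ∀ (rest : List (List (String × String))) (done : List String)
      (seen : PySem.Dict String Int) (refs : PySem.Dict String String),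
      done ++ rest.map pyBase = bases →
      (∀ b, seen.getD b 0 = (done.count b : Int)) →
      (rest.foldl
        (fun (st : PySem.Dict String Int × PySem.Dict String String) c =>
          let base := pyBase c
          let seen := st.1.insert base (st.1.getD base 0 + 1)
          let ref := if lc.getD base 0 == 1 then base
                     else base ++ "#" ++ PySem.Int.toStr (seen.getD base 0)
          (seen, st.2.insert ((PySem.Dict.mk c).getD "id" "") ref))
        (seen, refs)).2
      = (PySem.List.enumerate (rest.zip (rest.map pyBase)) (done.length : Int)).foldl
          (fun (refs : PySem.Dict String String) p =>
            refs.insert ((PySem.Dict.mk p.2.1).getD "id" "")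
              (if bases.count p.2.2 == 1 then p.2.2
               else p.2.2 ++ "#" ++
                    PySem.Int.toStr ((PySem.List.slice bases none (some (p.1 + 1))).count p.2.2 : Nat)))
          refs := by
  intro rest
  induction rest with
  | nil => intro done seen refs _ _; simp [PySem.List.enumerate_nil]
  | cons c rest ih =>
    intro done seen refs hb hseen
    rw [List.map_cons] at hb
    simp only [List.zip_cons_cons, List.map_cons, PySem.List.enumerate_cons, List.foldl_cons]
    have hpref : PySem.List.slice bases none (some ((done.length : Int) + 1)) = done ++ [pyBase c] := by
      rw [show ((done.length : Int) + 1) = ((done.length + 1 : Nat) : Int) by push_cast; ring,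
          PySem.List.slice_to_natCast, ← hb]
      simp [List.take_append]
    have hcond : (((bases.count (pyBase c) : Int)) == 1) = (bases.count (pyBase c) == 1) := by
      by_cases h : bases.count (pyBase c) = 1 <;> simp [h]
    have hrefstep :
        (if lc.getD (pyBase c) 0 == 1 then pyBase c
         else pyBase c ++ "#" ++ PySem.Int.toStr ((seen.insert (pyBase c) (seen.getD (pyBase c) 0 + 1)).getD (pyBase c) 0))
        = (if bases.count (pyBase c) == 1 then pyBase c
           else pyBase c ++ "#" ++
                PySem.Int.toStr (((PySem.List.slice bases none (some ((done.length : Int) + 1))).count (pyBase c) : Nat))) := by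
      rw [hlc, hcond, hpref, PySem.Dict.getD_insert_self, hseen]
      by_cases h : bases.count (pyBase c) = 1 <;> simp [h, List.count_append]
    have hstep := ih (done ++ [pyBase c])
      (seen.insert (pyBase c) (seen.getD (pyBase c) 0 + 1))
      (refs.insert ((PySem.Dict.mk c).getD "id" "")
        (if bases.count (pyBase c) == 1 then pyBase c
         else pyBase c ++ "#" ++
              PySem.Int.toStr (((PySem.List.slice bases none (some ((done.length : Int) + 1))).count (pyBase c) : Nat))))
      (by simpa using hb)
      (by
        intro b
        by_cases h : b = pyBase c
        · subst h; rw [PySem.Dict.getD_insert_self, hseen]; simp [List.count_append]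
        · rw [PySem.Dict.getD_insert_of_ne seen (seen.getD (pyBase c) 0 + 1) 0 h, hseen]
          simp [List.count_append, Ne.symm h])
    simp only at hstep ⊢
    rw [hrefstep]
    rw [show ((done ++ [pyBase c]).length : Int) = (done.length : Int) + 1 by simp] at hstep
    exact hstep

lemma A_eq_canon (components : List (List (String × String))) :
    build_component_refs components = (canonRefs components).items := by
  unfold build_component_refs canonRefs
  simp only
  have h := loop_eq (components.map pyBase)
    (components.foldl (fun d c => d.insert (pyBase c) (d.getD (pyBase c) 0 + 1)) PySem.Dict.empty)
    (label_counts_getD components)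
    components [] PySem.Dict.empty PySem.Dict.empty (by simp) (by intro b; rfl)
  simp only [List.length_nil, Nat.cast_zero] at h
  exact congrArg PySem.Dict.items h

-- ---------- B side (B = canonRefs) ----------

-- the list of positions of bases that equal b, in order (Nat form of a groups[] value)
def natIdx : List String → String → List Nat
  | [], _ => []
  | x :: xs, b => (if x = b then [0] else []) ++ (natIdx xs b).map (· + 1)

-- the canonical ref at position j
def refAt (bases : List String) (j : Nat) : String :=
  let b := bases.getD j ""
  if bases.count b == 1 then b
  else b ++ "#" ++ PySem.Int.toStr (((bases.take (j + 1)).count b : Nat) : Int)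

lemma length_natIdx (bases : List String) (b : String) :
    (natIdx bases b).length = bases.count b := by
  induction bases with
  | nil => simp [natIdx]
  | cons x xs ih =>
    by_cases h : x = b
    · simp [natIdx, h, ih, List.count_cons]
    · simp [natIdx, h, ih, List.count_cons, Ne.symm h]

lemma mem_natIdx (bases : List String) (b : String) (j : Nat) :
    j ∈ natIdx bases b ↔ bases[j]? = some b := by
  induction bases generalizing j with
  | nil => simp [natIdx]
  | cons x xs ih =>
    cases j with
    | zero =>
      by_cases h : x = b <;> simp [natIdx, h]
    | succ j =>
      by_cases h : x = b <;> simp [natIdx, h, ih]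

lemma nodup_natIdx (bases : List String) (b : String) : (natIdx bases b).Nodup := by
  induction bases with
  | nil => simp [natIdx]
  | cons x xs ih =>
    by_cases h : x = b <;>
      simp [natIdx, h, List.nodup_map_iff (add_left_injective 1), ih]

lemma idxOf_map_succ (l : List Nat) (j : Nat) :
    (l.map (· + 1)).idxOf (j + 1) = l.idxOf j := by
  induction l with
  | nil => simp
  | cons x xs ih =>
    by_cases h : x = j <;> simp [List.idxOf_cons, h, ih]

lemma idxOf_natIdx (bases : List String) (b : String) (j : Nat)
    (hj : bases[j]? = some b) :
    (natIdx bases b).idxOf j = (bases.take j).count b := by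
  induction bases generalizing j with
  | nil => simp at hj
  | cons x xs ih =>
    cases j with
    | zero =>
      simp at hj
      simp [natIdx, hj]
    | succ j =>
      simp at hj
      by_cases h : x = b
      · simp [natIdx, h, List.idxOf_cons, idxOf_map_succ, ih j hj, List.count_cons]
      · simp [natIdx, h, idxOf_map_succ, ih j hj, List.count_cons, Ne.symm h]

-- stage 1: the group dict's value at b is exactly natIdx (as Ints)
lemma groups_getD (components : List (List (String × String))) (b : String) :
    ((PySem.List.enumerate components).foldl
        (fun d p => d.modify (pyBase p.2) [] (· ++ [p.1])) PySem.Dict.empty).getD b []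
      = (natIdx (components.map pyBase) b).map (fun k : Nat => (k : Int)) := by
  have hfold :
      (PySem.List.enumerate components).foldl
          (fun d p => d.modify (pyBase p.2) [] (· ++ [p.1])) PySem.Dict.empty
        = ((PySem.List.enumerate components).map (fun p => (pyBase p.2, p.1))).foldl
            (fun d q => d.modify q.1 [] (· ++ [q.2])) PySem.Dict.empty := by
    rw [List.foldl_map]
  rw [hfold, PySem.Dict.getD_foldl_modify_append]
  simp only [PySem.Dict.getD_empty, List.nil_append]
  -- reduce to a statement by induction on components, generalizing the start index
  suffices h : ∀ (cs : List (List (String × String))) (s : Nat),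
      ((((PySem.List.enumerate cs (s : Int)).map (fun p => (pyBase p.2, p.1))).filter
          (fun q => q.1 == b)).map (·.2))
        = (natIdx (cs.map pyBase) b).map (fun k => ((s + k : Nat) : Int)) by
    have h0 := h components 0
    simp only [Nat.cast_zero, Nat.zero_add] at h0
    exact h0
  intro cs
  induction cs with
  | nil => intro s; simp [PySem.List.enumerate_nil, natIdx]
  | cons c cs ih =>
    intro s
    by_cases h : pyBase c = b
    · simp only [PySem.List.enumerate_cons, List.map_cons, List.filter_cons]
      rw [if_pos (by simp [h])]
      simp only [List.map_cons]
      rw [show ((s : Int) + 1) = ((s + 1 : Nat) : Int) by push_cast; ring, ih (s + 1)]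
      rw [show natIdx (pyBase c :: cs.map pyBase) b
            = [0] ++ (natIdx (cs.map pyBase) b).map (· + 1) from by simp [natIdx, h]]
      simp only [List.singleton_append, List.map_cons, List.map_map]
      refine congrArg₂ List.cons (by norm_num) ?_
      apply List.map_congr_left
      intro k _
      simp only [Function.comp_apply]
      congr 1
      omega
    · simp only [PySem.List.enumerate_cons, List.map_cons, List.filter_cons]
      rw [if_neg (by simp [h])]
      rw [show ((s : Int) + 1) = ((s + 1 : Nat) : Int) by push_cast; ring, ih (s + 1)]
      rw [show natIdx (pyBase c :: cs.map pyBase) b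
            = (natIdx (cs.map pyBase) b).map (· + 1) from by simp [natIdx, h]]
      simp only [List.map_map]
      apply List.map_congr_left
      intro k _
      simp only [Function.comp_apply]
      congr 1
      omega

-- stage 1: the group dict's keys are the distinct bases in order
lemma groups_keys (components : List (List (String × String))) :
    ((PySem.List.enumerate components).foldl
        (fun d p => d.modify (pyBase p.2) [] (· ++ [p.1])) PySem.Dict.empty).keys
      = PySem.Set.ofList (components.map pyBase) := by
  rw [PySem.Dict.keys_foldl_modify_key]
  have h2 : (PySem.List.enumerate components).map (fun p => pyBase p.2)
      = components.map pyBase := by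
    rw [show (fun p : Int × List (String × String) => pyBase p.2) = pyBase ∘ (·.2) from rfl,
        ← List.map_map, PySem.List.map_snd_enumerate]
  rw [h2]
  rfl

-- the inner enumerate/setD loop of stage 2, over distinct in-range positions
lemma inner_loop (b : String) (idxs : List Nat) :
    ∀ (s : Int) (ra : List String),
      (∀ k ∈ idxs, k < ra.length) → idxs.Nodup →
      ∀ j : Nat,
      ((PySem.List.enumerate (idxs.map (fun k : Nat => (k : Int))) s).foldl
          (fun r p => PySem.List.pySetD r p.2 (b ++ "#" ++ PySem.Int.toStr p.1)) ra).getD j ""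
        = if j ∈ idxs then b ++ "#" ++ PySem.Int.toStr (s + (idxs.idxOf j : Int))
          else ra.getD j "" := by
  induction idxs with
  | nil => intro s ra _ _ j; simp [PySem.List.enumerate_nil]
  | cons k idxs ih =>
    intro s ra hrange hnd j
    simp only [List.map_cons, PySem.List.enumerate_cons, List.foldl_cons,
      PySem.List.pySetD_natCast]
    rw [ih (s + 1) (ra.set k (b ++ "#" ++ PySem.Int.toStr s))
      (by intro x hx; rw [List.length_set]; exact hrange x (List.mem_cons_of_mem _ hx))
      (List.Nodup.of_cons hnd) j]
    by_cases hmem : j ∈ idxs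
    · have hne : k ≠ j := by
        intro h; subst h; exact (List.nodup_cons.mp hnd).1 hmem
      have hkj : (k == j) = false := by simp [hne]
      simp only [hmem, if_true, List.mem_cons, or_true, List.idxOf_cons, hkj, cond_false]
      congr 1
      push_cast
      ring
    · by_cases hjk : j = k
      · subst hjk
        simp only [hmem, if_false, List.mem_cons, true_or, if_true]
        rw [List.getD_eq_getElem?_getD, List.getElem?_set_self (hrange j (by simp))]
        simp [List.idxOf_cons]
      · simp only [hmem, if_false, List.mem_cons, hjk, false_or]
        rw [List.getD_eq_getElem?_getD, List.getElem?_set_ne (by omega)]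
        simp [List.getD_eq_getElem?_getD]

lemma length_inner_loop (b : String) (idxs : List Int) :
    ∀ (s : Int) (ra : List String),
      ((PySem.List.enumerate idxs s).foldl
          (fun r p => PySem.List.pySetD r p.2 (b ++ "#" ++ PySem.Int.toStr p.1)) ra).length
        = ra.length := by
  induction idxs with
  | nil => intro s ra; simp [PySem.List.enumerate_nil]
  | cons k idxs ih =>
    intro s ra
    simp only [PySem.List.enumerate_cons, List.foldl_cons]
    rw [ih]
    exact PySem.List.length_pySetD ra k _

-- one group's assignment step, written over the natIdx value
def assign (bases : List String) (b : String) (ra : List String) : List String :=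
  if ((natIdx bases b).map (fun k : Nat => (k : Int))).length == 1 then
    PySem.List.pySetD ra (PySem.List.pyGetD ((natIdx bases b).map (fun k : Nat => (k : Int))) 0 0) b
  else
    (PySem.List.enumerate ((natIdx bases b).map (fun k : Nat => (k : Int))) 1).foldl
      (fun r p => PySem.List.pySetD r p.2 (b ++ "#" ++ PySem.Int.toStr p.1)) ra

lemma length_assign (bases : List String) (b : String) (ra : List String) :
    (assign bases b ra).length = ra.length := by
  unfold assign
  by_cases hc : ((((natIdx bases b).map (fun k : Nat => (k : Int))).length == 1) = true)
  · rw [if_pos hc]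
    exact PySem.List.length_pySetD ra _ b
  · rw [if_neg hc]
    exact length_inner_loop b _ 1 ra

lemma take_succ_count (bases : List String) (b : String) (j : Nat)
    (hj : bases[j]? = some b) :
    (bases.take (j + 1)).count b = (bases.take j).count b + 1 := by
  rw [List.take_succ, hj]
  simp [List.count_append]

lemma assign_getD (bases : List String) (b : String) (ra : List String)
    (hlen : ra.length = bases.length) (j : Nat) (hj : j < bases.length) :
    (assign bases b ra).getD j ""
      = if bases[j]? = some b then refAt bases j else ra.getD j "" := by
  unfold assign
  by_cases hone : (natIdx bases b).length = 1
  · obtain ⟨j₀, hj₀⟩ := List.length_eq_one_iff.mp hone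
    have hmem : j₀ ∈ natIdx bases b := by rw [hj₀]; simp
    have hbj₀ : bases[j₀]? = some b := (mem_natIdx bases b j₀).mp hmem
    have hcount : bases.count b = 1 := by rw [← length_natIdx, hone]
    have hj₀lt : j₀ < ra.length := by
      rw [hlen]; exact (List.getElem?_eq_some_iff.mp hbj₀).1
    rw [hj₀]
    simp only [List.map_cons, List.map_nil]
    rw [if_pos (by simp)]
    rw [show PySem.List.pyGetD [((j₀ : Nat) : Int)] (0 : Int) (0 : Int) = (j₀ : Int) from by
      simp [PySem.List.pyGetD, PySem.List.pyIdx?, PySem.List.pyGet?]]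
    rw [PySem.List.pySetD_natCast]
    by_cases hcase : bases[j]? = some b
    · have : j ∈ natIdx bases b := (mem_natIdx bases b j).mpr hcase
      rw [hj₀] at this; simp at this; subst this
      rw [List.getD_eq_getElem?_getD, List.getElem?_set_self hj₀lt]
      have hb : bases.getD j "" = b := by
        rw [List.getD_eq_getElem?_getD, hcase]; rfl
      simp [hcase, refAt, hb, hcount]
    · have hne : j ≠ j₀ := by
        intro h; subst h; exact hcase hbj₀
      rw [List.getD_eq_getElem?_getD, List.getElem?_set_ne (by omega)]
      simp [hcase, List.getD_eq_getElem?_getD]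
  · have hcount : bases.count b ≠ 1 := by rw [← length_natIdx]; exact hone
    rw [if_neg (by simp [hone])]
    rw [inner_loop b (natIdx bases b) 1 ra
      (by intro k hk; rw [hlen]; exact (List.getElem?_eq_some_iff.mp ((mem_natIdx bases b k).mp hk)).1)
      (nodup_natIdx bases b) j]
    by_cases hcase : bases[j]? = some b
    · have hmemj : j ∈ natIdx bases b := (mem_natIdx bases b j).mpr hcase
      have hb : bases.getD j "" = b := by
        rw [List.getD_eq_getElem?_getD, hcase]; rfl
      rw [if_pos hmemj, if_pos hcase]
      rw [idxOf_natIdx bases b j hcase]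
      unfold refAt
      simp only [hb, hcount, beq_iff_eq, if_false, if_neg hcount]
      congr 1
      rw [take_succ_count bases b j hcase]
      push_cast
      ring
    · have hmemj : j ∉ natIdx bases b := fun h => hcase ((mem_natIdx bases b j).mp h)
      rw [if_neg hmemj, if_neg hcase]
  
-- the whole stage-2 fold over any list of group names
lemma fold_assign_getD (bases : List String) :
    ∀ (gs : List String) (ra : List String), ra.length = bases.length →
      ∀ j : Nat, j < bases.length →
      (gs.foldl (fun ra b => assign bases b ra) ra).getD j ""
        = if bases.getD j "" ∈ gs then refAt bases j else ra.getD j "" := by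
  intro gs
  induction gs with
  | nil => intro ra _ j _; simp
  | cons b gs ih =>
    intro ra hlen j hj
    have hbj : bases[j]? = some (bases.getD j "") := by
      rw [List.getD_eq_getElem?_getD, List.getElem?_eq_getElem hj]; rfl
    rw [List.foldl_cons, ih (assign bases b ra) (by rw [length_assign, hlen]) j hj,
      assign_getD bases b ra hlen j hj]
    by_cases h1 : bases.getD j "" ∈ gs
    · rw [if_pos h1, if_pos (List.mem_cons_of_mem b h1)]
    · rw [if_neg h1]
      by_cases h2 : bases.getD j "" = b
      · rw [if_pos (h2 ▸ hbj), if_pos (List.mem_cons.mpr (Or.inl h2))]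
      · have hns : ¬ (bases[j]? = some b) := by
          rw [hbj]; intro hco; exact h2 (Option.some.inj hco)
        rw [if_neg hns, if_neg (fun hm => (List.mem_cons.mp hm).elim h2 h1)]

lemma length_fold_assign (bases : List String) (gs : List String) (ra : List String) :
    (gs.foldl (fun ra b => assign bases b ra) ra).length = ra.length := by
  induction gs generalizing ra with
  | nil => simp
  | cons b gs ih => rw [List.foldl_cons, ih, length_assign]

-- stage 3: writing the position array in component order is canonRefs' fold
lemma zip_fold_eq (bases : List String) :
    ∀ (cs : List (List (String × String))) (s : Nat) (ra : List String)
      (refs : PySem.Dict String String),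
      ra.length = cs.length →
      (∀ k : Nat, k < cs.length → ra.getD k "" = refAt bases (s + k)) →
      cs.map pyBase = bases.drop s →
      (cs.zip ra).foldl
          (fun (refs : PySem.Dict String String) p =>
            refs.insert ((PySem.Dict.mk p.1).getD "id" "") p.2) refs
        = (PySem.List.enumerate (cs.zip (bases.drop s)) (s : Int)).foldl
            (fun (refs : PySem.Dict String String) p =>
              refs.insert ((PySem.Dict.mk p.2.1).getD "id" "")
                (if bases.count p.2.2 == 1 then p.2.2
                 else p.2.2 ++ "#" ++
                      PySem.Int.toStr ((PySem.List.slice bases none (some (p.1 + 1))).count p.2.2 : Nat)))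
            refs := by
  intro cs
  induction cs with
  | nil =>
    intro s ra refs _ _ hdrop
    rw [show bases.drop s = [] from by simpa using hdrop.symm]
    simp [PySem.List.enumerate_nil]
  | cons c cs ih =>
    intro s ra refs hlen hra hdrop
    cases ra with
    | nil => simp at hlen
    | cons r ra =>
      rw [List.map_cons] at hdrop
      have hdropcons : bases.drop s = pyBase c :: cs.map pyBase := hdrop.symm
      have hs : bases[s]? = some (pyBase c) := by
        have h0 : (bases.drop s)[0]? = some (pyBase c) := by rw [hdropcons]; rfl
        rw [List.getElem?_drop] at h0
        simpa using h0
      have hslt : s < bases.length := (List.getElem?_eq_some_iff.mp hs).1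
      have hbs : bases.getD s "" = pyBase c := by
        rw [List.getD_eq_getElem?_getD, hs]; rfl
      rw [hdropcons]
      simp only [List.zip_cons_cons, PySem.List.enumerate_cons, List.foldl_cons]
      have hr : r = refAt bases s := by
        have := hra 0 (by simp)
        simpa using this
      have hval :
          (if bases.count (pyBase c) == 1 then pyBase c
           else pyBase c ++ "#" ++
                PySem.Int.toStr ((PySem.List.slice bases none (some ((s : Int) + 1))).count (pyBase c) : Nat))
            = refAt bases s := by
        unfold refAt
        rw [show ((s : Int) + 1) = ((s + 1 : Nat) : Int) by push_cast; ring,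
          PySem.List.slice_to_natCast, hbs]
      rw [hr, hval]
      have hdrop' : cs.map pyBase = bases.drop (s + 1) := by
        have : (bases.drop s).tail = bases.drop (s + 1) := by
          rw [List.tail_drop]
        rw [← this, hdropcons]
        rfl
      have := ih (s + 1) ra
        (refs.insert ((PySem.Dict.mk c).getD "id" "") (refAt bases s))
        (by simpa using hlen)
        (by
          intro k hk
          have := hra (k + 1) (by simpa using Nat.succ_lt_succ hk)
          simpa [Nat.add_assoc, Nat.add_comm 1 k] using this)
        hdrop'
      rw [← hdrop'] at this
      exact this

lemma B_eq_canon (components : List (List (String × String))) :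
    build_component_refs_alt components = (canonRefs components).items := by
  unfold build_component_refs_alt canonRefs
  simp only
  set bases := components.map pyBase with hbases
  -- the group dict
  set groups := (PySem.List.enumerate components).foldl
      (fun d p => d.modify (pyBase p.2) [] (· ++ [p.1])) PySem.Dict.empty with hgroups
  have hnodup : groups.keys.Nodup := by
    rw [hgroups]
    exact PySem.Dict.nodup_keys_foldl_modify_key _ _ _ _ PySem.Dict.empty (by simp)
  have hitems : groups.items = groups.keys.map (fun k => (k, groups.getD k [])) :=
    PySem.Dict.items_eq_map_keys groups hnodup []
  -- the stage-2 fold is the assign fold over the distinct bases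
  have hstage2 :
      groups.items.foldl
          (fun ra g =>
            if g.2.length == 1 then
              PySem.List.pySetD ra (PySem.List.pyGetD g.2 0 0) g.1
            else
              (PySem.List.enumerate g.2 1).foldl
                (fun r p => PySem.List.pySetD r p.2 (g.1 ++ "#" ++ PySem.Int.toStr p.1)) ra)
          (List.replicate components.length "")
        = (PySem.Set.ofList bases).foldl (fun ra b => assign bases b ra)
            (List.replicate components.length "") := by
    rw [hitems, List.foldl_map, groups_keys]
    apply PySem.List.foldl_congr_mem
    intro ra b _
    rw [hgroups, groups_getD]
    unfold assign
    rfl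
  rw [hstage2]
  set ra := (PySem.Set.ofList bases).foldl (fun ra b => assign bases b ra)
      (List.replicate components.length "") with hra
  have hlenra : ra.length = components.length := by
    rw [hra, length_fold_assign, List.length_replicate]
  have hlenb : bases.length = components.length := by simp [hbases]
  have hraj : ∀ k : Nat, k < components.length → ra.getD k "" = refAt bases k := by
    intro k hk
    rw [hra, fold_assign_getD bases (PySem.Set.ofList bases)
      (List.replicate components.length "") (by simp [hlenb]) k (by omega)]
    have hmem : bases.getD k "" ∈ bases := by
      rw [List.getD_eq_getElem?_getD, List.getElem?_eq_getElem (by omega)]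
      exact List.getElem_mem _
    rw [if_pos ((PySem.Set.mem_ofList _ _).mpr hmem)]
  apply congrArg PySem.Dict.items
  have := zip_fold_eq bases components 0 ra PySem.Dict.empty
    (by rw [hlenra]) (by simpa using hraj) (by simp [hbases])
  simpa using this

-- ===== VERDICT (by name: the statement is the Claim_ definition above) =====
theorem build_component_refs_spec : Claim_equal_build_component_refs := by
  intro components _ _
  unfold Spec_build_component_refs
  rw [A_eq_canon, B_eq_canon]
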